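-- pv_equiv track=rewrite | github.com/viroovr/baekjoon | Platinum/Platinum IV/1014.py | isPossibledp
-- ===== SOURCE A (Python) =====
-- def isPossibledp(prevMask, currentMask):
--     size = len(currentMask)
--     for i in range(size):
--         if currentMask[i] == '0':
--             continue
--         if i == 0:
--             if prevMask[i + 1] == '1':
--                 return False
--         elif i == size - 1:
--             if prevMask[i - 1] == '1':
--                 return False
--         else:
--             if prevMask[i - 1] == '1' or prevMask[i + 1] == '1':
--                 return False
--     return True
-- ===== SOURCE B (Python) =====
-- def isPossibledp(prevMask, currentMask):
--     size = len(currentMask)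
--     occupied = {i for i, c in enumerate(currentMask) if c != '0'}
--     ones = {i for i, c in enumerate(prevMask[:size]) if c == '1'}
--     bad = {i - 1 for i in ones if i >= 1} | {i + 1 for i in ones if i + 1 < size}
--     return not (occupied & bad)
-- ===== Notes on version B (the rewrite author's own statement) =====
-- stated objective: alternative
-- what changed: Replaces A's per-column scan with early returns and three boundary branches by a branch-free set computation: intersect the set of occupied columns with the set of columns adjacent to a '1' of the previous row and test emptiness.
-- intended difference: On a one-column currentMask with an occupied seat (and prevMask long enough that A does not raise), A consults the non-existent right neighbour prevMask[1] and returns False when it is '1', while B returns True, the intended value since a lone column has no diagonal neighbours. — e.g. on isPossibledp("01", "7"): A returns false, B returns true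
-- outside the precondition, e.g. on isPossibledp('1', '011'): A returns False, B returns False; on isPossibledp('', '10'): A raises IndexError, B returns True
import Mathlib
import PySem

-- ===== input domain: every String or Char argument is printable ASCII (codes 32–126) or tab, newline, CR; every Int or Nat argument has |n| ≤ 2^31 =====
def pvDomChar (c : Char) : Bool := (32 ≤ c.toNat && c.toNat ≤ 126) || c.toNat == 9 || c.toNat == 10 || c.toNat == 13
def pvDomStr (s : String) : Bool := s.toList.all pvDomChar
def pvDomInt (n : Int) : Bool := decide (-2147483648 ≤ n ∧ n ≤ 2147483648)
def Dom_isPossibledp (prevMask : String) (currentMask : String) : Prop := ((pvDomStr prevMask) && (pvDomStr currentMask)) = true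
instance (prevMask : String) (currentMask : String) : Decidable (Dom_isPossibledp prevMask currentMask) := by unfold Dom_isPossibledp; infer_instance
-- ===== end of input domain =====

-- B replaces A's per-column loop with early returns and three boundary branches by a
-- branch-free set computation: the occupied columns intersected with the columns adjacent
-- to a '1' of the previous row (alternative decomposition; same asymptotic cost).

-- ===== PORT A =====
-- the for-loop with early 'return False'; on Pre_ every prev index A reads is in range,
-- so List.getD is exact there (where an index is out of range Python raises IndexError;
-- those inputs are outside Pre_ and nothing is claimed about them)
def isPossibledpLoop (prev cur : List Char) (size : Nat) : Nat → Nat → Bool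
  | _, 0 => true
  | i, fuel + 1 =>
    if i < size then
      if cur.getD i ' ' = '0' then isPossibledpLoop prev cur size (i + 1) fuel
      else if i = 0 then
        if prev.getD (i + 1) ' ' = '1' then false
        else isPossibledpLoop prev cur size (i + 1) fuel
      else if i = size - 1 then
        if prev.getD (i - 1) ' ' = '1' then false
        else isPossibledpLoop prev cur size (i + 1) fuel
      else
        if prev.getD (i - 1) ' ' = '1' ∨ prev.getD (i + 1) ' ' = '1' then false
        else isPossibledpLoop prev cur size (i + 1) fuel
    else true

def isPossibledp (prevMask : String) (currentMask : String) : Bool :=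
  isPossibledpLoop prevMask.toList currentMask.toList currentMask.toList.length 0
    currentMask.toList.length

-- ===== PORT B =====
def isPossibledp_alt (prevMask : String) (currentMask : String) : Bool :=
  let size := currentMask.toList.length
  let occupied : PySem.Set Int :=
    PySem.Set.ofList
      (((PySem.List.enumerate currentMask.toList 0).filter (fun ic => ic.2 != '0')).map (fun ic => ic.1))
  let ones : PySem.Set Int :=
    PySem.Set.ofList
      (((PySem.List.enumerate (PySem.List.slice prevMask.toList none (some (size : Int))) 0).filter
          (fun ic => ic.2 == '1')).map (fun ic => ic.1))
  let bad : PySem.Set Int :=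
    PySem.Set.union
      (PySem.Set.ofList ((ones.filter (fun i => decide (1 ≤ i))).map (fun i => i - 1)))
      (PySem.Set.ofList ((ones.filter (fun i => decide (i + 1 < (size : Int)))).map (fun i => i + 1)))
  (PySem.Set.inter occupied bad).isEmpty

-- ===== PRECONDITION & SPEC =====
-- Pre_ is the closed-form in-range condition for every neighbour index A may probe in
-- prevMask: outside it A raises IndexError on some occupied column (on the remaining
-- excluded inputs A happens to return early and B returns the same value, but the exact
-- set of inputs where A's scan raises is order-dependent and not closed-form).
def Pre_isPossibledp (prevMask : String) (currentMask : String) : Prop :=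
  (2 ≤ currentMask.toList.length → currentMask.toList.length ≤ prevMask.toList.length) ∧
  (currentMask.toList.length = 1 ∧ currentMask.toList.getD 0 ' ' ≠ '0' → 2 ≤ prevMask.toList.length)

instance (prevMask : String) (currentMask : String) : Decidable (Pre_isPossibledp prevMask currentMask) := by
  unfold Pre_isPossibledp; infer_instance

def pvWitness_isPossibledp : String × String := ("0101", "1010")

-- On a one-column currentMask with an occupied seat, A consults prevMask[1] — a column to
-- the right that does not exist in a one-column room — and returns False when prevMask
-- happens to carry '1' there; B returns True, the intended value, since a lone column has
-- no diagonal neighbours.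
def D_isPossibledp (prevMask : String) (currentMask : String) : Prop :=
  currentMask.toList.length = 1 ∧ currentMask.toList.getD 0 ' ' ≠ '0' ∧
  2 ≤ prevMask.toList.length ∧ prevMask.toList.getD 1 ' ' = '1'

instance (prevMask : String) (currentMask : String) : Decidable (D_isPossibledp prevMask currentMask) := by
  unfold D_isPossibledp; infer_instance

def Spec_isPossibledp (prevMask : String) (currentMask : String) (out : Bool) : Prop :=
  ¬ D_isPossibledp prevMask currentMask → out = isPossibledp_alt prevMask currentMask
instance (prevMask : String) (currentMask : String) (out : Bool) : Decidable (Spec_isPossibledp prevMask currentMask out) := by unfold Spec_isPossibledp; infer_instance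

def pvDiffWitness_isPossibledp : String × String := ("01", "7")
def pvDiffWitnessOut_isPossibledp : Bool × Bool := (false, true)

-- ===== CLAIM (what is proved, stated in full; the proofs are below) =====
def Claim_unchanged_isPossibledp : Prop := ∀ (prevMask : String) (currentMask : String), Dom_isPossibledp prevMask currentMask → Pre_isPossibledp prevMask currentMask → Spec_isPossibledp prevMask currentMask (isPossibledp prevMask currentMask)
def Claim_changed_isPossibledp : Prop := Dom_isPossibledp (pvDiffWitness_isPossibledp.1) (pvDiffWitness_isPossibledp.2) ∧ Pre_isPossibledp (pvDiffWitness_isPossibledp.1) (pvDiffWitness_isPossibledp.2) ∧ D_isPossibledp (pvDiffWitness_isPossibledp.1) (pvDiffWitness_isPossibledp.2) ∧ isPossibledp (pvDiffWitness_isPossibledp.1) (pvDiffWitness_isPossibledp.2) = pvDiffWitnessOut_isPossibledp.1 ∧ isPossibledp_alt (pvDiffWitness_isPossibledp.1) (pvDiffWitness_isPossibledp.2) = pvDiffWitnessOut_isPossibledp.2 ∧ pvDiffWitnessOut_isPossibledp.1 ≠ pvDiffWitnessOut_isPossibledp.2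
def Claim_exact_isPossibledp : Prop := ∀ (prevMask : String) (currentMask : String), Dom_isPossibledp prevMask currentMask → Pre_isPossibledp prevMask currentMask → D_isPossibledp prevMask currentMask → isPossibledp prevMask currentMask ≠ isPossibledp_alt prevMask currentMask

-- ===== LEMMAS AND PROOFS =====

-- the common characterisation: every occupied column of cur has no '1' diagonally in prev
def pvCond (p l : List Char) : Prop :=
  ∀ i, i < l.length → l.getD i ' ' ≠ '0' →
    (1 ≤ i → p.getD (i - 1) ' ' ≠ '1') ∧ (i + 1 < l.length → p.getD (i + 1) ' ' ≠ '1')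

theorem pvStep (P : Nat → Prop) (size i : Nat) (hi : P i) :
    (∀ j, i + 1 ≤ j → j < size → P j) ↔ (∀ j, i ≤ j → j < size → P j) := by
  constructor
  · intro hall j hij hj
    rcases Nat.eq_or_lt_of_le hij with he | hlt
    · exact he ▸ hi
    · exact hall j hlt hj
  · intro hall j hij hj
    exact hall j (by omega) hj

theorem isPossibledpLoop_iff (prev cur : List Char) (size : Nat) :
    ∀ (fuel i : Nat), size ≤ i + fuel →
    (isPossibledpLoop prev cur size i fuel = true ↔
      ∀ j, i ≤ j → j < size → cur.getD j ' ' ≠ '0' →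
        ((j = 0 → prev.getD (j + 1) ' ' ≠ '1') ∧
         (j ≠ 0 → j = size - 1 → prev.getD (j - 1) ' ' ≠ '1') ∧
         (j ≠ 0 → j ≠ size - 1 →
            ¬(prev.getD (j - 1) ' ' = '1' ∨ prev.getD (j + 1) ' ' = '1')))) := by
  intro fuel
  induction fuel with
  | zero =>
    intro i hle
    simp only [isPossibledpLoop, true_iff]
    intro j hij hj hc
    exact absurd hj (by omega)
  | succ fuel ih =>
    intro i hle
    simp only [isPossibledpLoop]
    by_cases h : i < size
    · rw [if_pos h]
      by_cases h0 : cur.getD i ' ' = '0'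
      · rw [if_pos h0, ih (i + 1) (by omega)]
        exact pvStep _ size i (fun hc => absurd h0 hc)
      · rw [if_neg h0]
        by_cases hz : i = 0
        · subst hz
          rw [if_pos rfl]
          by_cases hp : prev.getD (0 + 1) ' ' = '1'
          · rw [if_pos hp]
            simp only [Bool.false_eq_true, false_iff]
            intro hall
            exact (hall 0 (le_refl 0) h h0).1 rfl hp
          · rw [if_neg hp, ih 1 (by omega)]
            exact pvStep _ size 0
              (fun _ => ⟨fun _ => hp, fun hne _ => absurd rfl hne, fun hne _ => absurd rfl hne⟩)
        · rw [if_neg hz]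
          by_cases hlast : i = size - 1
          · rw [if_pos hlast]
            by_cases hp : prev.getD (i - 1) ' ' = '1'
            · rw [if_pos hp]
              simp only [Bool.false_eq_true, false_iff]
              intro hall
              exact (hall i (le_refl i) h h0).2.1 hz hlast hp
            · rw [if_neg hp, ih (i + 1) (by omega)]
              exact pvStep _ size i
                (fun _ => ⟨fun he => absurd he hz, fun _ _ => hp, fun _ hne => absurd hlast hne⟩)
          · rw [if_neg hlast]
            by_cases hp : prev.getD (i - 1) ' ' = '1' ∨ prev.getD (i + 1) ' ' = '1'
            · rw [if_pos hp]
              simp only [Bool.false_eq_true, false_iff]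
              intro hall
              exact (hall i (le_refl i) h h0).2.2 hz hlast hp
            · rw [if_neg hp, ih (i + 1) (by omega)]
              exact pvStep _ size i
                (fun _ => ⟨fun he => absurd he hz, fun _ he => absurd he hlast, fun _ _ => hp⟩)
    · rw [if_neg h]
      simp only [true_iff]
      intro j hij hj hc
      exact absurd hj (by omega)

theorem isPossibledp_iff (prevMask currentMask : String)
    (hD : ¬ D_isPossibledp prevMask currentMask) :
    isPossibledp prevMask currentMask = true ↔
      pvCond prevMask.toList currentMask.toList := by
  unfold isPossibledp
  rw [isPossibledpLoop_iff _ _ _ _ 0 (by omega)]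
  set p := prevMask.toList with hp
  set l := currentMask.toList with hl
  set n := l.length with hn
  constructor
  · intro hall i hi hc
    have h := hall i (Nat.zero_le i) hi hc
    constructor
    · intro h1i
      by_cases him : i = n - 1
      · exact h.2.1 (by omega) him
      · intro hpc; exact h.2.2 (by omega) him (Or.inl hpc)
    · intro hilt
      by_cases hi0 : i = 0
      · subst hi0; simpa using h.1 rfl
      · by_cases him : i = n - 1
        · omega
        · intro hpc; exact h.2.2 hi0 him (Or.inr hpc)
  · intro hco j hj0le hj hc
    have h := hco j hj hc
    refine ⟨?_, ?_, ?_⟩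
    · intro hj0
      subst hj0
      by_cases hn2 : 2 ≤ n
      · simpa using h.2 (by omega)
      · -- n = 1 and column 0 occupied: ¬D_ says prev.getD 1 is not '1' (or prev is short,
        -- in which case getD gives the default ' ')
        have hn1 : n = 1 := by omega
        intro hpc
        by_cases hplen : 2 ≤ p.length
        · exact hD ⟨hn1, hc, hplen, hpc⟩
        · have hno : p.getD 1 ' ' = ' ' := by
            rw [List.getD_eq_getElem?_getD, List.getElem?_eq_none (by omega)]
            rfl
          rw [hno] at hpc
          exact absurd hpc (by decide)
    · intro hj0 hjm
      exact h.1 (by omega)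
    · intro hj0 hjm
      rintro (hpc | hpc)
      · exact h.1 (by omega) hpc
      · exact h.2 (by omega) hpc

theorem pvMemIdx (xs : List Char) (f : Char → Bool) (b : Int) :
    b ∈ ((PySem.List.enumerate xs 0).filter (fun ic => f ic.2)).map (fun ic => ic.1) ↔
      ∃ k : Nat, k < xs.length ∧ f (xs.getD k ' ') = true ∧ b = (k : Int) := by
  simp only [List.mem_map, List.mem_filter, PySem.List.mem_enumerate_iff]
  constructor
  · rintro ⟨bc, ⟨⟨k, hk, hkp⟩, hf⟩, hb⟩
    subst hkp
    refine ⟨k, hk, ?_, by simpa using hb.symm⟩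
    rw [List.getD_eq_getElem _ _ hk]
    simpa using hf
  · rintro ⟨k, hk, hf, rfl⟩
    refine ⟨((k : Int), xs[k]), ⟨⟨k, hk, by simp⟩, ?_⟩, rfl⟩
    rw [List.getD_eq_getElem _ _ hk] at hf
    simpa using hf

theorem isPossibledp_alt_iff (prevMask currentMask : String) :
    isPossibledp_alt prevMask currentMask = true ↔
      pvCond prevMask.toList currentMask.toList := by
  unfold isPossibledp_alt
  set p := prevMask.toList with hp
  set l := currentMask.toList with hl
  set n := l.length with hn
  rw [List.isEmpty_iff, List.eq_nil_iff_forall_not_mem]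
  have hsl : PySem.List.slice p none (some (n : Int)) = p.take n :=
    (PySem.List.slice_to p (by positivity)).trans (by norm_num)
  rw [hsl]
  -- membership characterisations
  have hocc : ∀ b : Int,
      (b ∈ ((PySem.List.enumerate l 0).filter (fun ic => ic.2 != '0')).map (fun ic => ic.1) ↔
        ∃ k : Nat, k < n ∧ l.getD k ' ' ≠ '0' ∧ b = (k : Int)) := by
    intro b
    rw [pvMemIdx l (fun c => c != '0') b]
    constructor
    · rintro ⟨k, hk, hf, rfl⟩
      exact ⟨k, hk, by simpa using hf, rfl⟩
    · rintro ⟨k, hk, hf, rfl⟩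
      exact ⟨k, hk, by simpa using hf, rfl⟩
  have hone : ∀ b : Int,
      (b ∈ ((PySem.List.enumerate (p.take n) 0).filter (fun ic => ic.2 == '1')).map (fun ic => ic.1) ↔
        ∃ k : Nat, k < n ∧ k < p.length ∧ p.getD k ' ' = '1' ∧ b = (k : Int)) := by
    intro b
    rw [pvMemIdx (p.take n) (fun c => c == '1') b]
    constructor
    · rintro ⟨k, hk, hf, rfl⟩
      simp only [List.length_take] at hk
      have hkp : k < p.length := by omega
      have hkn : k < n := by omega
      have hgd : (p.take n).getD k ' ' = p.getD k ' ' := by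
        rw [List.getD_eq_getElem _ _ (by simp only [List.length_take]; omega),
            List.getD_eq_getElem _ _ hkp]
        exact List.getElem_take ..
      rw [hgd] at hf
      exact ⟨k, hkn, hkp, by simpa using hf, rfl⟩
    · rintro ⟨k, hkn, hkp, hf, rfl⟩
      have hkl : k < (p.take n).length := by simp only [List.length_take]; omega
      have hgd : (p.take n).getD k ' ' = p.getD k ' ' := by
        rw [List.getD_eq_getElem _ _ hkl, List.getD_eq_getElem _ _ hkp]
        exact List.getElem_take ..
      exact ⟨k, hkl, by rw [hgd]; simpa using hf, rfl⟩
  constructor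
  · intro hmem i hi hc
    constructor
    · intro h1i hpc
      have hplen : i - 1 < p.length := by
        by_contra hge
        rw [List.getD_eq_getElem?_getD, List.getElem?_eq_none (by omega)] at hpc
        exact absurd hpc (by decide)
      refine hmem (i : Int) ?_
      rw [PySem.Set.mem_inter, PySem.Set.mem_ofList, PySem.Set.mem_union,
          PySem.Set.mem_ofList, PySem.Set.mem_ofList, hocc]
      refine ⟨⟨i, hi, hc, rfl⟩, Or.inr ?_⟩
      simp only [List.mem_map, List.mem_filter, PySem.Set.mem_ofList, hone]
      refine ⟨((i : Int) - 1), ⟨⟨i - 1, by omega, hplen, hpc, by omega⟩, by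
        simp only [decide_eq_true_eq]; omega⟩, by ring⟩
    · intro hilt hpc
      have hplen : i + 1 < p.length := by
        by_contra hge
        rw [List.getD_eq_getElem?_getD, List.getElem?_eq_none (by omega)] at hpc
        exact absurd hpc (by decide)
      refine hmem (i : Int) ?_
      rw [PySem.Set.mem_inter, PySem.Set.mem_ofList, PySem.Set.mem_union,
          PySem.Set.mem_ofList, PySem.Set.mem_ofList, hocc]
      refine ⟨⟨i, hi, hc, rfl⟩, Or.inl ?_⟩
      simp only [List.mem_map, List.mem_filter, PySem.Set.mem_ofList, hone]
      refine ⟨((i : Int) + 1), ⟨⟨i + 1, by omega, hplen, hpc, by omega⟩, by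
        simp only [decide_eq_true_eq]; omega⟩, by ring⟩
  · intro hco b hb
    rw [PySem.Set.mem_inter, PySem.Set.mem_ofList, PySem.Set.mem_union,
        PySem.Set.mem_ofList, PySem.Set.mem_ofList, hocc] at hb
    obtain ⟨⟨k, hk, hkocc, rfl⟩, hbad⟩ := hb
    simp only [List.mem_map, List.mem_filter, PySem.Set.mem_ofList, hone,
      decide_eq_true_eq] at hbad
    have hcnd := hco k hk hkocc
    rcases hbad with ⟨j, ⟨⟨m, hmn, hmp, hpm, rfl⟩, hm1⟩, hjb⟩ | ⟨j, ⟨⟨m, hmn, hmp, hpm, rfl⟩, hmlt⟩, hjb⟩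
    · -- k = m - 1 : the '1' at column m of prev is up-right of column k
      have hm1n : 1 ≤ m := by omega
      have hkm : k = m - 1 := by omega
      have : k + 1 < n := by omega
      exact (hcnd.2 this) (by rw [show k + 1 = m from by omega]; exact hpm)
    · -- k = m + 1 : the '1' at column m of prev is up-left of column k
      have hkm : k = m + 1 := by omega
      exact (hcnd.1 (by omega)) (by rw [show k - 1 = m from by omega]; exact hpm)

-- ===== VERDICT (by name: the statement is the Claim_ definition above) =====
theorem isPossibledp_spec : Claim_unchanged_isPossibledp := by
  intro prevMask currentMask _ hpre hD
  have h1 := isPossibledp_iff prevMask currentMask hD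
  have h2 := isPossibledp_alt_iff prevMask currentMask
  cases hA : isPossibledp prevMask currentMask <;>
    cases hB : isPossibledp_alt prevMask currentMask <;> simp_all

theorem isPossibledp_changed : Claim_changed_isPossibledp := by
  unfold Claim_changed_isPossibledp; decide

theorem isPossibledp_tight : Claim_exact_isPossibledp := by
  intro prevMask currentMask _ _ hD
  obtain ⟨hc1, hc0, hplen, hp1⟩ := hD
  have hA : isPossibledp prevMask currentMask = false := by
    rw [Bool.eq_false_iff]
    intro h
    unfold isPossibledp at h
    rw [isPossibledpLoop_iff _ _ _ _ 0 (by omega)] at h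
    exact (h 0 (le_refl 0) (by omega) hc0).1 rfl hp1
  have hB : isPossibledp_alt prevMask currentMask = true := by
    rw [isPossibledp_alt_iff]
    intro i hi hc
    have hi0 : i = 0 := by omega
    subst hi0
    exact ⟨by omega, by omega⟩
  rw [hA, hB]
  decide
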